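-- pv_equiv track=rewrite | github.com/wizardboy2010/Competitions | Optiver_2019/problem_1/problem1_sub2.py | create_prod_pair_dict
-- ===== SOURCE A (Python) =====
-- def create_prod_pair_dict(inputNumber):
--     d = dict()
--     for n1 in range(1, inputNumber+1):
--         for n2 in range(n1, inputNumber+1):
--             if n1*n2 in d:
--                 d[n1*n2].append([n1,n2])
--             else:
--                 d[n1*n2] = [[n1,n2]]
--     return d
-- ===== SOURCE B (Python) =====
-- def _factor_pairs(p, limit):
--     pairs = []
--     f = -(-p // limit)  # smallest candidate: a smaller f would give a cofactor > limit
--     if f < 1: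
--         f = 1
--     while f * f <= p:
--         if p % f == 0:
--             pairs.append([f, p // f])
--         f += 1
--     return pairs
--
--
-- def create_prod_pair_dict(inputNumber):
--     d = dict()
--     for n1 in range(1, inputNumber + 1):
--         for p in range(n1 * n1, n1 * inputNumber + 1, n1):
--             if p not in d:
--                 d[p] = _factor_pairs(p, inputNumber)
--     return d
-- ===== Notes on version B (the rewrite author's own statement) =====
-- stated objective: alternative
-- what changed: A enumerates ordered pairs (n1,n2) and groups them by appending into a dict keyed by their product; B enumerates each candidate product once (multiples of n1, skipping products already seen) and builds that product's complete pair list in one shot by trial division up to its square root.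
import Mathlib
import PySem

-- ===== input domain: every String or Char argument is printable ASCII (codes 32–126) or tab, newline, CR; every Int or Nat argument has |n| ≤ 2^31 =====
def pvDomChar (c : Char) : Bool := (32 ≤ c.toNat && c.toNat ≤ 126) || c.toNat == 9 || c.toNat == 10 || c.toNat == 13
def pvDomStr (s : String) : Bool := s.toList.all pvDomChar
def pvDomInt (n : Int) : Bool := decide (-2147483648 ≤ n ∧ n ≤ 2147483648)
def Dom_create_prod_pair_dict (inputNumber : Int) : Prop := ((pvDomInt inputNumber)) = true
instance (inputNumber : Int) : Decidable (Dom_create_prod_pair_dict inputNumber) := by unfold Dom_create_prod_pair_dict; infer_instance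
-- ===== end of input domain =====

-- B re-implements the grouping product-first: it enumerates each product once (multiples of n1) and
-- builds that product's whole pair list by trial division, instead of A's pair-enumeration with
-- grouping appends; objective: alternative algorithm, not faster.

-- ===== PORT A =====
def create_prod_pair_dict (inputNumber : Int) : List (Int × List (List Int)) :=
  ((PySem.List.pyRange 1 (inputNumber + 1)).foldl
    (fun d n1 =>
      (PySem.List.pyRange n1 (inputNumber + 1)).foldl
        (fun d n2 =>
          if d.contains (n1 * n2) then
            d.modify (n1 * n2) [] (fun l => l ++ [[n1, n2]])
          else
            d.insert (n1 * n2) [[n1, n2]])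
        d)
    PySem.Dict.empty).items

-- ===== PORT B =====
-- termination fact for the trial-division while-loop of Source B (cited by decreasing_by)
theorem pvFactorLoop_dec {p f : Int} (h : f * f ≤ p) : (p + 1 - (f + 1)).toNat < (p + 1 - f).toNat := by
  have h0 : 0 ≤ p := le_trans (mul_self_nonneg f) h
  have h2 : 2 * f ≤ p + 1 := by nlinarith [sq_nonneg (f - 1)]
  omega

-- the `while f*f <= p` loop of Source B's _factor_pairs
def pvFactorLoop (p f : Int) (pairs : List (List Int)) : List (List Int) :=
  if _h : f * f ≤ p then
    pvFactorLoop p (f + 1)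
      (if PySem.Int.mod p f = 0 then pairs ++ [[f, PySem.Int.floordiv p f]] else pairs)
  else pairs
termination_by (p + 1 - f).toNat
decreasing_by exact pvFactorLoop_dec ‹f * f ≤ p›

-- Source B's _factor_pairs: start at ceil(p/limit) (a smaller f would give a cofactor > limit)
def pvFactorPairs (p limit : Int) : List (List Int) :=
  let f := -(PySem.Int.floordiv (-p) limit)
  pvFactorLoop p (if f < 1 then 1 else f) []

def create_prod_pair_dict_alt (inputNumber : Int) : List (Int × List (List Int)) :=
  ((PySem.List.pyRange 1 (inputNumber + 1)).foldl
    (fun d n1 =>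
      (PySem.List.pyRange (n1 * n1) (n1 * inputNumber + 1) n1).foldl
        (fun d p =>
          if d.contains p then d else d.insert p (pvFactorPairs p inputNumber))
        d)
    PySem.Dict.empty).items

-- ===== PRECONDITION & SPEC =====
def Spec_create_prod_pair_dict (inputNumber : Int) (out : List (Int × List (List Int))) : Prop := out = create_prod_pair_dict_alt inputNumber
instance (inputNumber : Int) (out : List (Int × List (List Int))) : Decidable (Spec_create_prod_pair_dict inputNumber out) := by unfold Spec_create_prod_pair_dict; infer_instance

-- ===== CLAIM (what is proved, stated in full; the proofs are below) =====
def Claim_equal_create_prod_pair_dict : Prop := ∀ (inputNumber : Int), Dom_create_prod_pair_dict inputNumber → Spec_create_prod_pair_dict inputNumber (create_prod_pair_dict inputNumber)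

-- ===== LEMMAS AND PROOFS =====

-- the flattened (n1, n2) enumeration both programs traverse
def pvPairs (N : Int) : List (Int × Int) :=
  (PySem.List.pyRange 1 (N + 1)).flatMap
    (fun a => (PySem.List.pyRange a (N + 1)).map (fun b => (a, b)))

def pvStepA (d : PySem.Dict Int (List (List Int))) (q : Int × Int) : PySem.Dict Int (List (List Int)) :=
  if d.contains (q.1 * q.2) then d.modify (q.1 * q.2) [] (fun l => l ++ [[q.1, q.2]])
  else d.insert (q.1 * q.2) [[q.1, q.2]]

def pvStepB (N : Int) (d : PySem.Dict Int (List (List Int))) (q : Int × Int) : PySem.Dict Int (List (List Int)) :=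
  if d.contains (q.1 * q.2) then d else d.insert (q.1 * q.2) (pvFactorPairs (q.1 * q.2) N)


theorem pv_mem_pairs {N : Int} {q : Int × Int} :
    q ∈ pvPairs N ↔ 1 ≤ q.1 ∧ q.1 ≤ q.2 ∧ q.2 ≤ N := by
  obtain ⟨a, b⟩ := q
  simp only [pvPairs, List.mem_flatMap, List.mem_map, PySem.List.mem_pyRange_one, Prod.mk.injEq]
  constructor
  · rintro ⟨a', ⟨h1, h2⟩, b', ⟨h3, h4⟩, rfl, rfl⟩
    exact ⟨h1, by omega, by omega⟩
  · rintro ⟨h1, h2, h3⟩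
    exact ⟨a, ⟨h1, by omega⟩, b, ⟨h2, by omega⟩, rfl, rfl⟩

theorem pvA_eq_fold (N : Int) :
    create_prod_pair_dict N = ((pvPairs N).foldl pvStepA PySem.Dict.empty).items := by
  simp only [create_prod_pair_dict, pvPairs, List.foldl_flatMap, List.foldl_map, pvStepA]

theorem pvRange_mul (n1 N : Int) (h : 1 ≤ n1) :
    PySem.List.pyRange (n1 * n1) (n1 * N + 1) n1 =
      (PySem.List.pyRange n1 (N + 1)).map (fun b => n1 * b) := by
  have hpos : (0 : Int) < n1 := h
  rw [PySem.List.pyRange_of_pos _ _ hpos,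
    PySem.List.pyRange_of_pos n1 (N + 1) (by norm_num : (0 : Int) < 1), List.map_map]
  have hcond : n1 * n1 < n1 * N + 1 ↔ n1 < N + 1 := by
    constructor <;> intro hx <;> nlinarith
  have hcnt : (n1 * N + 1 - n1 * n1 + n1 - 1) / n1 = N + 1 - n1 := by
    have he : n1 * N + 1 - n1 * n1 + n1 - 1 = n1 * (N + 1 - n1) := by ring
    rw [he, Int.mul_ediv_cancel_left _ (by omega)]
  by_cases hn : n1 < N + 1
  · rw [if_pos hn, if_pos (hcond.mpr hn), hcnt]
    have hcnt1 : (N + 1 - n1 + 1 - 1) / 1 = N + 1 - n1 := by simp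
    rw [hcnt1]
    apply List.map_congr_left
    intro k _
    simp only [Function.comp]
    ring
  · rw [if_neg hn, if_neg (fun hx => hn (hcond.mp hx))]
    simp

theorem pvB_eq_fold (N : Int) :
    create_prod_pair_dict_alt N = ((pvPairs N).foldl (pvStepB N) PySem.Dict.empty).items := by
  simp only [create_prod_pair_dict_alt, pvPairs, List.foldl_flatMap, List.foldl_map, pvStepB]
  congr 1
  apply PySem.List.foldl_congr_mem
  intro d n1 hmem
  have h1 : 1 ≤ n1 := (PySem.List.mem_pyRange_one.mp hmem).1
  rw [pvRange_mul n1 N h1, List.foldl_map]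

theorem pv_filter_unique {l : List Int} (hnd : l.Nodup) {P : Int → Bool} {x : Int}
    (hx : ∀ y, P y = true ↔ y = x) : l.filter P = if x ∈ l then [x] else [] := by
  induction l with
  | nil => simp
  | cons y t ih =>
    rcases List.nodup_cons.mp hnd with ⟨hy, ht⟩
    by_cases hPy : P y = true
    · have hyx : y = x := (hx y).mp hPy
      subst hyx
      rw [List.filter_cons_of_pos hPy, if_pos List.mem_cons_self]
      have : t.filter P = [] := by
        rw [List.filter_eq_nil_iff]
        intro z hz hPz
        exact hy (((hx z).mp hPz) ▸ hz)
      rw [this]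
    · have hyx : y ≠ x := fun he => hPy ((hx y).mpr he)
      rw [List.filter_cons_of_neg (by simpa using hPy), ih ht]
      simp [List.mem_cons, hyx.symm]

-- characterization of the trial-division loop as a filter of f..p
theorem pvFactorLoop_char (p f : Int) (acc : List (List Int)) (hf : 1 ≤ f) :
    pvFactorLoop p f acc = acc ++
      ((PySem.List.pyRange f (p + 1)).filter
        (fun g => decide (PySem.Int.mod p g = 0 ∧ g * g ≤ p))).map
        (fun g => [g, PySem.Int.floordiv p g]) := by
  rw [pvFactorLoop]
  split
  · rename_i h
    have hfp : f ≤ p := le_trans (le_mul_of_one_le_left (by omega) hf) h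
    rw [pvFactorLoop_char p (f + 1) _ (by omega)]
    rw [PySem.List.pyRange_one_cons (by omega : f < p + 1), List.filter_cons]
    by_cases hcond : PySem.Int.mod p f = 0
    · rw [if_pos hcond]
      have hd : decide (PySem.Int.mod p f = 0 ∧ f * f ≤ p) = true := by
        simp only [decide_eq_true_eq]; exact ⟨hcond, h⟩
      simp [hd, List.append_assoc]
    · rw [if_neg hcond]
      have hd : decide (PySem.Int.mod p f = 0 ∧ f * f ≤ p) = false := by
        simp only [decide_eq_false_iff_not]; tauto
      simp [hd]
  · rename_i h
    have hnil : (PySem.List.pyRange f (p + 1)).filter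
        (fun g => decide (PySem.Int.mod p g = 0 ∧ g * g ≤ p)) = [] := by
      rw [List.filter_eq_nil_iff]
      intro g hg
      have hfg := PySem.List.mem_pyRange_one.mp hg
      simp only [decide_eq_true_eq, not_and]
      intro _ hgg
      exact h (by nlinarith)
    rw [hnil]
    simp
termination_by (p + 1 - f).toNat
decreasing_by exact pvFactorLoop_dec ‹f * f ≤ p›

-- _factor_pairs with its starting point ceil(p/N) equals the full-condition filter of 1..p
theorem pvFactorPairs_char (p N : Int) (hp : 1 ≤ p) (hN : 1 ≤ N) :
    pvFactorPairs p N =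
      ((PySem.List.pyRange 1 (p + 1)).filter
        (fun g => decide (PySem.Int.mod p g = 0 ∧ PySem.Int.floordiv p g ≤ N ∧ g * g ≤ p))).map
        (fun g => [g, PySem.Int.floordiv p g]) := by
  have hN0 : (0 : Int) < N := hN
  have hceil : ∀ g : Int, -(PySem.Int.floordiv (-p) N) ≤ g ↔ p ≤ g * N := by
    intro g
    rw [PySem.Int.floordiv_eq_ediv_of_pos hN0, neg_le, Int.le_ediv_iff_mul_le hN0, neg_mul,
      neg_le_neg_iff]
  set c := -(PySem.Int.floordiv (-p) N) with hc
  set f0 : Int := if c < 1 then 1 else c with hf0def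
  have hf01 : 1 ≤ f0 := by rw [hf0def]; split <;> omega
  have hcf0 : c ≤ f0 := by rw [hf0def]; split <;> omega
  have hf0p : f0 ≤ p + 1 := by
    rw [hf0def]; split
    · omega
    · have := (hceil (p + 1)).mpr (by nlinarith)
      omega
  have key : pvFactorPairs p N = pvFactorLoop p f0 [] := rfl
  rw [key, pvFactorLoop_char p f0 [] hf01, List.nil_append,
    PySem.List.pyRange_one_append 1 f0 (p + 1) hf01 hf0p, List.filter_append]
  have hnil : (PySem.List.pyRange 1 f0).filter
      (fun g => decide (PySem.Int.mod p g = 0 ∧ PySem.Int.floordiv p g ≤ N ∧ g * g ≤ p)) = [] := by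
    rw [List.filter_eq_nil_iff]
    intro g hg
    have hgm := PySem.List.mem_pyRange_one.mp hg
    simp only [decide_eq_true_eq]
    rintro ⟨hm, hdN, -⟩
    have hgc : g < c := by
      rcases hgm with ⟨hg1, hgf⟩
      rw [hf0def] at hgf
      split at hgf <;> omega
    have hgN : ¬ p ≤ g * N := fun hle => absurd ((hceil g).mpr hle) (by omega)
    have hdvd : g ∣ p := (PySem.Int.mod_eq_zero_iff_dvd p g).mp hm
    have hg0 : (0 : Int) < g := hgm.1
    have hfd : PySem.Int.floordiv p g = p / g := PySem.Int.floordiv_eq_ediv_of_pos hg0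
    have hmul : g * (p / g) = p := Int.mul_ediv_cancel' hdvd
    rw [hfd] at hdN
    exact hgN (by nlinarith)
  rw [hnil, List.nil_append]
  congr 1
  apply List.filter_congr
  intro g hg
  have hgm := PySem.List.mem_pyRange_one.mp hg
  have hg0 : (0 : Int) < g := by omega
  have hpg : p ≤ g * N := (hceil g).mp (by omega)
  have hdN : PySem.Int.floordiv p g ≤ N := by
    have hlt := (PySem.Int.floordiv_lt_iff_lt_mul (a := p) (b := g) (q := N + 1) hg0).mpr (by nlinarith)
    omega
  simp [hdN]

theorem pv_flatMap_if {α β : Type} (l : List α) (P : α → Prop) [DecidablePred P] (f : α → β) :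
    l.flatMap (fun a => if P a then [f a] else []) = (l.filter (fun a => decide (P a))).map f := by
  induction l with
  | nil => rfl
  | cons x t ih => by_cases h : P x <;> simp [h, ih]

theorem pv_filter_singleton {a p N : Int} (ha : 1 ≤ a) :
    (PySem.List.pyRange a (N + 1)).filter (fun b => a * b == p) =
      (if PySem.Int.mod p a = 0 ∧ PySem.Int.floordiv p a ≤ N ∧ a * a ≤ p
       then [PySem.Int.floordiv p a] else []) := by
  have ha0 : (0 : Int) < a := ha
  by_cases hc : PySem.Int.mod p a = 0 ∧ PySem.Int.floordiv p a ≤ N ∧ a * a ≤ p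
  · obtain ⟨hm, hdN, haa⟩ := hc
    have hdvd : a ∣ p := (PySem.Int.mod_eq_zero_iff_dvd p a).mp hm
    have hfd : PySem.Int.floordiv p a = p / a := PySem.Int.floordiv_eq_ediv_of_pos ha0
    have hmul : a * (p / a) = p := Int.mul_ediv_cancel' hdvd
    have hx : ∀ y, ((a * y == p) = true) ↔ y = p / a := by
      intro y
      constructor
      · intro hy
        have hy' : a * y = p := by simpa using hy
        exact mul_left_cancel₀ (by omega) (hy'.trans hmul.symm)
      · rintro rfl
        simpa using hmul
    rw [pv_filter_unique (PySem.List.nodup_pyRange_one a (N + 1)) hx]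
    have hle : a ≤ p / a := (Int.le_ediv_iff_mul_le ha0).mpr haa
    have hmem : p / a ∈ PySem.List.pyRange a (N + 1) :=
      PySem.List.mem_pyRange_one.mpr ⟨hle, by omega⟩
    rw [if_pos hmem, if_pos ⟨hm, hdN, haa⟩, hfd]
  · rw [if_neg hc, List.filter_eq_nil_iff]
    intro b hb hab
    have hmem := PySem.List.mem_pyRange_one.mp hb
    have habp : a * b = p := by simpa using hab
    apply hc
    have hdvd : a ∣ p := ⟨b, habp.symm⟩
    have hfd : PySem.Int.floordiv p a = b := by
      rw [PySem.Int.floordiv_eq_ediv_of_pos ha0, ← habp, Int.mul_ediv_cancel_left _ (by omega)]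
    exact ⟨(PySem.Int.mod_eq_zero_iff_dvd p a).mpr hdvd, by omega, by nlinarith [hmem.1]⟩

theorem pv_filter_shrink (b c : Int) (P : Int → Bool) (h0 : 0 ≤ c) (hcb : c ≤ b)
    (hP : ∀ g, c < g → P g = false) :
    (PySem.List.pyRange 1 (b + 1)).filter P = (PySem.List.pyRange 1 (c + 1)).filter P := by
  rw [PySem.List.pyRange_one_append 1 (c + 1) (b + 1) (by omega) (by omega), List.filter_append]
  have hnil : (PySem.List.pyRange (c + 1) (b + 1)).filter P = [] := by
    rw [List.filter_eq_nil_iff]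
    intro g hg
    have := PySem.List.mem_pyRange_one.mp hg
    simp [hP g (by omega)]
  rw [hnil, List.append_nil]

-- each key's full pair list: trial division agrees with filtering the enumeration
theorem pvFactor_char {N : Int} {q : Int × Int} (hq : q ∈ pvPairs N) :
    pvFactorPairs (q.1 * q.2) N =
      ((pvPairs N).filter (fun r => r.1 * r.2 == q.1 * q.2)).map (fun r => [r.1, r.2]) := by
  obtain ⟨h1, h2, h3⟩ := pv_mem_pairs.mp hq
  set p := q.1 * q.2 with hp
  have hp1 : 1 ≤ p := by nlinarith
  have hN1 : 1 ≤ N := by omega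
  -- rewrite the right-hand side into a filter of 1..N
  have hrhs : ((pvPairs N).filter (fun r => r.1 * r.2 == p)).map (fun r => [r.1, r.2]) =
      ((PySem.List.pyRange 1 (N + 1)).filter
        (fun g => decide (PySem.Int.mod p g = 0 ∧ PySem.Int.floordiv p g ≤ N ∧ g * g ≤ p))).map
        (fun g => [g, PySem.Int.floordiv p g]) := by
    rw [pvPairs, List.filter_flatMap, List.map_flatMap, ← pv_flatMap_if]
    apply List.flatMap_congr
    intro a hamem
    have ha : 1 ≤ a := (PySem.List.mem_pyRange_one.mp hamem).1
    rw [List.filter_map]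
    have hpred : (fun r => r.1 * r.2 == p) ∘ (fun b => (a, b)) = (fun b => a * b == p) := rfl
    rw [hpred, List.map_map]
    have hfun : ((fun r => [r.1, r.2]) ∘ (fun b => (a, b))) = (fun b => [a, b]) := rfl
    rw [hfun, pv_filter_singleton ha, apply_ite (List.map (fun b => [a, b]))]
    simp
  rw [hrhs, pvFactorPairs_char p N hp1 hN1]
  congr 1
  have hfail : ∀ g, min p N < g →
      decide (PySem.Int.mod p g = 0 ∧ PySem.Int.floordiv p g ≤ N ∧ g * g ≤ p) = false := by
    intro g hg
    simp only [decide_eq_false_iff_not, not_and]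
    intro _ hdN hgg
    rcases (by omega : p < g ∨ N < g) with hcase | hcase
    · nlinarith
    · have hg0 : (0 : Int) < g := by omega
      have hle : g ≤ PySem.Int.floordiv p g := by
        rw [PySem.Int.floordiv_eq_ediv_of_pos hg0]
        exact (Int.le_ediv_iff_mul_le hg0).mpr hgg
      omega
  rw [pv_filter_shrink p (min p N) _ (by omega) (by omega) hfail,
    pv_filter_shrink N (min p N) _ (by omega) (by omega) hfail]

theorem pv_lockstep (N : Int) : ∀ (todo : List (Int × Int)) (dA dB : PySem.Dict Int (List (List Int))),
    dA.keys = dB.keys → dA.keys.Nodup →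
    (∀ p ∈ dA.keys, dB.getD p [] = dA.getD p [] ++
        (todo.filter (fun r => r.1 * r.2 == p)).map (fun r => [r.1, r.2])) →
    (∀ q ∈ todo, q.1 * q.2 ∉ dA.keys →
        pvFactorPairs (q.1 * q.2) N = (todo.filter (fun r => r.1 * r.2 == q.1 * q.2)).map (fun r => [r.1, r.2])) →
    todo.foldl pvStepA dA = todo.foldl (pvStepB N) dB := by
  intro todo
  induction todo with
  | nil =>
    intro dA dB h1 h2 h3 _
    simp only [List.foldl_nil]
    apply PySem.Dict.ext
    rw [PySem.Dict.items_eq_map_keys dA h2 [], PySem.Dict.items_eq_map_keys dB (h1 ▸ h2) [], ← h1]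
    apply List.map_congr_left
    intro k hk
    have h3' := h3 k hk
    simp only [List.filter_nil, List.map_nil, List.append_nil] at h3'
    rw [h3']
  | cons q t ih =>
    intro dA dB h1 h2 h3 h4
    simp only [List.foldl_cons]
    by_cases hc : q.1 * q.2 ∈ dA.keys
    · have hcA : dA.contains (q.1 * q.2) = true := by
        rw [PySem.Dict.contains_eq_decide_mem_keys]; simp [hc]
      have hcB : dB.contains (q.1 * q.2) = true := by
        rw [PySem.Dict.contains_eq_decide_mem_keys, ← h1]; simp [hc]
      have hsA : pvStepA dA q = dA.modify (q.1 * q.2) [] (fun l => l ++ [[q.1, q.2]]) := by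
        simp [pvStepA, hcA]
      have hsB : pvStepB N dB q = dB := by simp [pvStepB, hcB]
      rw [hsA, hsB]
      have hkeys : (dA.modify (q.1 * q.2) [] (fun l => l ++ [[q.1, q.2]])).keys = dA.keys := by
        rw [PySem.Dict.keys_modify, PySem.Dict.keys_insert_of_contains _ _ hcA]
      apply ih
      · rw [hkeys, h1]
      · rw [hkeys]; exact h2
      · intro pk hpk
        rw [hkeys] at hpk
        have h3' := h3 pk hpk
        rw [List.filter_cons] at h3'
        rw [PySem.Dict.getD_modify]
        by_cases hpe : pk = q.1 * q.2
        · rw [if_pos hpe]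
          rw [hpe] at h3' ⊢
          simp only [beq_self_eq_true, if_pos] at h3'
          rw [h3']
          simp [List.append_assoc]
        · rw [if_neg hpe]
          have hbe : (q.1 * q.2 == pk) = false := by
            simp only [beq_eq_false_iff_ne, ne_eq]
            exact fun he => hpe he.symm
          rw [hbe] at h3'
          simpa using h3'
      · intro q' hq' hq'n
        rw [hkeys] at hq'n
        have h4' := h4 q' (List.mem_cons_of_mem _ hq') hq'n
        rw [List.filter_cons] at h4'
        have hbe : (q.1 * q.2 == q'.1 * q'.2) = false := by
          simp only [beq_eq_false_iff_ne, ne_eq]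
          exact fun he => hq'n (he ▸ hc)
        rw [hbe] at h4'
        simpa using h4'
    · have hcA : dA.contains (q.1 * q.2) = false := by
        rw [PySem.Dict.contains_eq_decide_mem_keys]; simp [hc]
      have hcB : dB.contains (q.1 * q.2) = false := by
        rw [PySem.Dict.contains_eq_decide_mem_keys, ← h1]; simp [hc]
      have hsA : pvStepA dA q = dA.insert (q.1 * q.2) [[q.1, q.2]] := by
        simp [pvStepA, hcA]
      have hsB : pvStepB N dB q = dB.insert (q.1 * q.2) (pvFactorPairs (q.1 * q.2) N) := by
        simp [pvStepB, hcB]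
      rw [hsA, hsB]
      have hkA : (dA.insert (q.1 * q.2) [[q.1, q.2]]).keys = dA.keys ++ [q.1 * q.2] :=
        PySem.Dict.keys_insert_of_not_contains _ _ hcA
      have hkB : (dB.insert (q.1 * q.2) (pvFactorPairs (q.1 * q.2) N)).keys = dB.keys ++ [q.1 * q.2] :=
        PySem.Dict.keys_insert_of_not_contains _ _ hcB
      apply ih
      · rw [hkA, hkB, h1]
      · rw [hkA]
        simp only [List.nodup_append, List.nodup_singleton, true_and, h2]
        intro a ha b hb
        simp only [List.mem_singleton] at hb
        exact fun he => hc (hb ▸ he ▸ ha)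
      · intro pk hpk
        rw [hkA] at hpk
        rcases List.mem_append.mp hpk with hin | hsing
        · have hpe : pk ≠ q.1 * q.2 := fun he => hc (he ▸ hin)
          rw [PySem.Dict.getD_insert, PySem.Dict.getD_insert, if_neg hpe, if_neg hpe]
          have h3' := h3 pk hin
          rw [List.filter_cons] at h3'
          have hbe : (q.1 * q.2 == pk) = false := by
            simp only [beq_eq_false_iff_ne, ne_eq]
            exact fun he => hpe he.symm
          rw [hbe] at h3'
          simpa using h3'
        · have hpe : pk = q.1 * q.2 := by simpa using hsing
          rw [PySem.Dict.getD_insert, PySem.Dict.getD_insert, if_pos hpe, if_pos hpe]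
          have h4' := h4 q List.mem_cons_self hc
          rw [h4', List.filter_cons]
          simp [hpe]
      · intro q' hq' hq'n
        rw [hkA] at hq'n
        have hnin : q'.1 * q'.2 ∉ dA.keys := fun hx => hq'n (List.mem_append_left _ hx)
        have hne : q'.1 * q'.2 ≠ q.1 * q.2 := fun he => hq'n (List.mem_append_right _ (by simp [he]))
        have h4' := h4 q' (List.mem_cons_of_mem _ hq') hnin
        rw [List.filter_cons] at h4'
        have hbe : (q.1 * q.2 == q'.1 * q'.2) = false := by
          simp only [beq_eq_false_iff_ne, ne_eq]
          exact fun he => hne he.symm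
        rw [hbe] at h4'
        simpa using h4'

-- ===== VERDICT (by name: the statement is the Claim_ definition above) =====
theorem create_prod_pair_dict_spec : Claim_equal_create_prod_pair_dict := by
  intro N _
  unfold Spec_create_prod_pair_dict
  rw [pvA_eq_fold, pvB_eq_fold]
  congr 1
  exact pv_lockstep N (pvPairs N) _ _ rfl (by simp) (by simp) (fun q hq _ => pvFactor_char hq)
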